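-- pv_equiv track=rewrite | github.com/NickSto/python-single | log-suspend.py | filter_args
-- ===== SOURCE A (Python) =====
-- def filter_args(args):
--   """Pass the entire argv and this will remove the command name and any arguments that shouldn't
--   be used when executing the hook."""
--   filtered_args = []
--   omit_next = False
--   for arg in args[1:]:
--     if omit_next:
--       omit_next = False
--       continue
--     if arg in ('-i', '--install'):
--       continue
--     if arg in ('-l', '--log'):
--       omit_next = True
--       continue
--     filtered_args.append(arg)
--   return filtered_args
-- ===== SOURCE B (Python) =====
-- def filter_args(args):
--   """Pass the entire argv and this will remove the command name and any arguments that shouldn't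
--   be used when executing the hook."""
--   rest = args[1:]
--   # Pass 1: mark which positions are the value of a preceding '-l'/'--log' flag.
--   skipped = []
--   skip = False
--   for arg in rest:
--     skipped.append(skip)
--     skip = (not skip) and arg in ('-l', '--log')
--   # Pass 2: keep everything that is neither a skipped value nor one of the flags.
--   return [arg for arg, sk in zip(rest, skipped)
--           if not sk and arg not in ('-i', '--install', '-l', '--log')]
-- ===== Notes on version B (the rewrite author's own statement) =====
-- stated objective: alternative
-- what changed: Replaces A's single stateful pass with two staged passes: pass 1 scans the tail to build a boolean mask of positions that are the value of a '-l'/'--log' flag, pass 2 is a stateless comprehension keeping tokens that are neither masked nor flags.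
import Mathlib
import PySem

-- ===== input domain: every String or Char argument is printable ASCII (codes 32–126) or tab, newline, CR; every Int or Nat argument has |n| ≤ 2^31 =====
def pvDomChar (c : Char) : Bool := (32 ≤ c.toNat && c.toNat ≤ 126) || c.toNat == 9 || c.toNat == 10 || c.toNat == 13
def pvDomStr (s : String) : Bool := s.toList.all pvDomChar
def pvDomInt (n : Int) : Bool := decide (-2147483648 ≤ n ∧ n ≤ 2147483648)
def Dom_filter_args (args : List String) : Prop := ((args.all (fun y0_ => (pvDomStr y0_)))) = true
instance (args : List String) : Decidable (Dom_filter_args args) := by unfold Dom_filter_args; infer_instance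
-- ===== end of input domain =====

-- B replaces A's single stateful pass with two staged passes (a scan building a skip mask,
-- then a stateless filter over the zipped list) — an alternative decomposition, same cost.


-- ===== PORT A =====
-- args[1:] (nonnegative start) = List.drop 1; the loop is a foldl over (filtered_args, omit_next).
def filter_args (args : List String) : List String :=
  ((args.drop 1).foldl
    (fun (st : List String × Bool) arg =>
      if st.2 then (st.1, false)
      else if arg = "-i" ∨ arg = "--install" then st
      else if arg = "-l" ∨ arg = "--log" then (st.1, true)
      else (st.1 ++ [arg], false))
    ([], false)).1

-- ===== PORT B =====
-- pass 1: foldl building (skipped, skip); pass 2: comprehension = zip + filter + map fst.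
def filter_args_alt (args : List String) : List String :=
  let rest := args.drop 1
  let st := rest.foldl
    (fun (st : List Bool × Bool) arg =>
      (st.1 ++ [st.2], (!st.2) && (arg == "-l" || arg == "--log")))
    ([], false)
  ((rest.zip st.1).filter
    (fun p => !p.2 && !(p.1 == "-i" || p.1 == "--install" || p.1 == "-l" || p.1 == "--log"))).map
    Prod.fst

-- ===== PRECONDITION & SPEC =====
def Spec_filter_args (args : List String) (out : List String) : Prop := out = filter_args_alt args
instance (args : List String) (out : List String) : Decidable (Spec_filter_args args out) := by unfold Spec_filter_args; infer_instance

-- ===== CLAIM (what is proved, stated in full; the proofs are below) =====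
def Claim_equal_filter_args : Prop := ∀ (args : List String), Dom_filter_args args → Spec_filter_args args (filter_args args)

-- ===== LEMMAS AND PROOFS =====

-- Reference recursion: the function both ports compute.
def pvGo : List String → List String
  | [] => []
  | arg :: rest =>
    if arg = "-i" ∨ arg = "--install" then pvGo rest
    else if arg = "-l" ∨ arg = "--log" then pvGo (rest.drop 1)
    else arg :: pvGo rest
  termination_by l => l.length
  decreasing_by all_goals (simp; try omega)

-- A's loop invariant: from (acc, false) it appends pvGo l; from (acc, true) it first discards one token.
theorem pv_a_fold_inv (l : List String) : ∀ acc : List String,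
    ((l.foldl
      (fun (st : List String × Bool) arg =>
        if st.2 then (st.1, false)
        else if arg = "-i" ∨ arg = "--install" then st
        else if arg = "-l" ∨ arg = "--log" then (st.1, true)
        else (st.1 ++ [arg], false))
      (acc, false)).1 = acc ++ pvGo l)
    ∧
    ((l.foldl
      (fun (st : List String × Bool) arg =>
        if st.2 then (st.1, false)
        else if arg = "-i" ∨ arg = "--install" then st
        else if arg = "-l" ∨ arg = "--log" then (st.1, true)
        else (st.1 ++ [arg], false))
      (acc, true)).1 = acc ++ pvGo (l.drop 1)) := by
  induction l with
  | nil => intro acc; simp [pvGo]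
  | cons a l ih =>
    intro acc
    constructor
    · by_cases hi : a = "-i" ∨ a = "--install"
      · simp [List.foldl_cons, hi, pvGo, (ih acc).1]
      · by_cases hl : a = "-l" ∨ a = "--log"
        · simp [List.foldl_cons, hi, hl, pvGo, (ih acc).2]
        · simp [List.foldl_cons, hi, hl, pvGo, (ih (acc ++ [a])).1]
    · simpa [List.foldl_cons, pvGo] using (ih acc).1

-- The mask pass 1 produces, written as a plain recursion.
def pvMask : Bool → List String → List Bool
  | _, [] => []
  | s, a :: l => s :: pvMask ((!s) && (a == "-l" || a == "--log")) l

-- B's first fold accumulates exactly pvMask.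
theorem pv_b_fold_mask (l : List String) : ∀ (m : List Bool) (s : Bool),
    (l.foldl
      (fun (st : List Bool × Bool) arg =>
        (st.1 ++ [st.2], (!st.2) && (arg == "-l" || arg == "--log")))
      (m, s)).1 = m ++ pvMask s l := by
  induction l with
  | nil => intro m s; simp [pvMask]
  | cons a l ih => intro m s; simp [List.foldl_cons, pvMask, ih]

-- B's second pass over (l, pvMask s l) equals pvGo (for s = false) / pvGo ∘ drop 1 (for s = true).
theorem pv_b_keep (l : List String) : ∀ s : Bool,
    ((l.zip (pvMask s l)).filter
      (fun p => !p.2 && !(p.1 == "-i" || p.1 == "--install" || p.1 == "-l" || p.1 == "--log"))).map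
      Prod.fst = if s then pvGo (l.drop 1) else pvGo l := by
  induction l with
  | nil => intro s; cases s <;> simp [pvMask, pvGo]
  | cons a l ih =>
    intro s
    cases s with
    | true =>
      simp only [pvMask, List.zip_cons_cons, List.filter_cons]
      simpa [pvGo] using ih false
    | false =>
      by_cases hi : a = "-i" ∨ a = "--install"
      · rcases hi with h | h <;>
          simpa [pvMask, pvGo, List.filter_cons, h] using ih false
      · by_cases hl : a = "-l" ∨ a = "--log"
        · rcases hl with h | h <;>
            simpa [pvMask, pvGo, List.filter_cons, h, hi] using ih true
        · have e1 : (a == "-i") = false := beq_eq_false_iff_ne.mpr (fun h => hi (Or.inl h))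
          have e2 : (a == "--install") = false := beq_eq_false_iff_ne.mpr (fun h => hi (Or.inr h))
          have e3 : (a == "-l") = false := beq_eq_false_iff_ne.mpr (fun h => hl (Or.inl h))
          have e4 : (a == "--log") = false := beq_eq_false_iff_ne.mpr (fun h => hl (Or.inr h))
          simpa [pvMask, pvGo, List.filter_cons, e1, e2, e3, e4, hi, hl] using ih false

-- ===== VERDICT (by name: the statement is the Claim_ definition above) =====
theorem filter_args_spec : Claim_equal_filter_args := by
  intro args _
  unfold Spec_filter_args filter_args filter_args_alt
  simp only [pv_b_fold_mask, List.nil_append]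
  rw [(pv_a_fold_inv (args.drop 1) []).1, pv_b_keep (args.drop 1) false]
  simp
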